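-- pv_equiv track=rewrite | github.com/EthanGeekFan/hdc_music_genre | music-pred/hdc/basis.py | c_gen_hv_to_hex_arr
-- ===== SOURCE A (Python) =====
-- def c_gen_hv_to_hex_arr(hv: list[int]) -> str:
--     # for each 32 ints, convert to a uint literal 0x00000000
--     # then join them all together
--     nums = []
--     words = len(hv) // 32
--     tail = len(hv) % 32
--     for i in range(words):
--         num = 0
--         for j in range(32):
--             num = num << 1
--             num = num | (hv[i*32+j] & 1)
--         nums.append(num)
--     if tail > 0:
--         num = 0
--         for j in range(tail):
--             num = num << 1
--             num = num | (hv[words*32+j] & 1)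
--         num = num << (32-tail)
--         nums.append(num)
--     return "{" + ", ".join(map(lambda n: "0x%08x" % n, nums)) + "}"
-- ===== SOURCE B (Python) =====
-- def c_gen_hv_to_hex_arr(hv: list[int]) -> str:
--     # Fold all bits into one big integer, then slice 32-bit words out of it.
--     n = len(hv)
--     m = ((n + 31) // 32) * 32
--     total = 0
--     for b in hv:
--         total = (total << 1) | (b & 1)
--     total <<= m - n
--     parts = []
--     for i in range(m // 32):
--         parts.append("0x%08x" % ((total >> (m - 32 * (i + 1))) & 0xFFFFFFFF))
--     return "{" + ", ".join(parts) + "}"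
-- ===== Notes on version B (the rewrite author's own statement) =====
-- stated objective: alternative
-- what changed: B folds all bits into a single big integer in one pass (with zero right-padding) and then slices each 32-bit word out of it by shift-and-mask, replacing A's nested per-word loops and separate tail branch.
import Mathlib
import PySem

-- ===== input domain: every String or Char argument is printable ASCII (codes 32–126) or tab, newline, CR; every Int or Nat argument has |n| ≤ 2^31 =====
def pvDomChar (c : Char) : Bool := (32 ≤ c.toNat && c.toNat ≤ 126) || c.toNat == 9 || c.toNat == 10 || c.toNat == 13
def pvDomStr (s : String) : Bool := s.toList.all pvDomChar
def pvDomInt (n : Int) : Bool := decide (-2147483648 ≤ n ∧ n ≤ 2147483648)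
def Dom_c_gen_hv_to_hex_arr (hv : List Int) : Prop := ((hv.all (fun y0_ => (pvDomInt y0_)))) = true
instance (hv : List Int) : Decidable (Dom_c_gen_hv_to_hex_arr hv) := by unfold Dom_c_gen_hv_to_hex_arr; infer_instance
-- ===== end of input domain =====

-- B packs the bits into one big integer in a single pass and slices 32-bit words out of it,
-- instead of A's nested per-word loops with a separate tail branch (objective: alternative).

-- "0x%08x" for 0 ≤ n < 2^32 (the only values either program formats); exact there.
def pvHexDigit (n : Nat) : Char :=
  if n < 10 then Char.ofNat (48 + n) else Char.ofNat (87 + n)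
def pvHex8 (n : Int) : String :=
  "0x" ++ String.ofList ((List.range 8).map (fun k => pvHexDigit ((n.toNat >>> (4 * (7 - k))) % 16)))

-- ===== PORT A =====
-- 'num << 1' then '| (x & 1)' is 'num * 2 + x.emod 2': the or-ed bit is 0/1 onto an even number,
-- and Python's 'x & 1' is floor-mod 2, which Int.emod matches for the positive divisor 2.
-- All indices i*32+j / words*32+j are in range, so getD's default 0 is never used.
def c_gen_hv_to_hex_arr (hv : List Int) : String :=
  let words := hv.length / 32
  let tail := hv.length % 32
  let nums : List Int :=
    (List.range words).map (fun i =>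
      (List.range 32).foldl (fun num j => num * 2 + (hv.getD (i * 32 + j) 0).emod 2) 0)
  let nums := if tail > 0 then
      nums ++ [((List.range tail).foldl
          (fun num j => num * 2 + (hv.getD (words * 32 + j) 0).emod 2) 0) * 2 ^ (32 - tail)]
    else nums
  "{" ++ String.intercalate ", " (nums.map pvHex8) ++ "}"

-- ===== PORT B =====
-- '(total << 1) | (b & 1)' = total * 2 + b.emod 2 (bit is 0/1 onto an even number);
-- 'total >> k' on the nonnegative total is division by 2^k (Lean Int '/' agrees with Python
-- floor division on nonnegative operands), '& 0xFFFFFFFF' on a nonnegative value is emod 2^32.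
def c_gen_hv_to_hex_arr_alt (hv : List Int) : String :=
  let n := hv.length
  let m := ((n + 31) / 32) * 32
  let total := hv.foldl (fun t b => t * 2 + b.emod 2) 0
  let total := total * 2 ^ (m - n)
  let parts := (List.range (m / 32)).map
      (fun i => pvHex8 ((total / 2 ^ (m - 32 * (i + 1))).emod (2 ^ 32)))
  "{" ++ String.intercalate ", " parts ++ "}"

-- ===== PRECONDITION & SPEC =====
def Spec_c_gen_hv_to_hex_arr (hv : List Int) (out : String) : Prop := out = c_gen_hv_to_hex_arr_alt hv
instance (hv : List Int) (out : String) : Decidable (Spec_c_gen_hv_to_hex_arr hv out) := by unfold Spec_c_gen_hv_to_hex_arr; infer_instance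

-- ===== CLAIM (what is proved, stated in full; the proofs are below) =====
def Claim_equal_c_gen_hv_to_hex_arr : Prop := ∀ (hv : List Int), Dom_c_gen_hv_to_hex_arr hv → Spec_c_gen_hv_to_hex_arr hv (c_gen_hv_to_hex_arr hv)

-- ===== LEMMAS AND PROOFS =====

-- value of a bit list, MSB first, folded onto accumulator t
def pvVal (t : Int) (l : List Int) : Int := l.foldl (fun a b => a * 2 + b) t

def pvBits (hv : List Int) : List Int := hv.map (fun b => b.emod 2)

theorem pvVal_acc (l : List Int) : ∀ t, pvVal t l = t * 2 ^ l.length + pvVal 0 l := by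
  induction l with
  | nil => intro t; simp [pvVal]
  | cons b l ih =>
    intro t
    simp only [pvVal, List.foldl_cons, List.length_cons] at *
    rw [ih (t * 2 + b), ih (0 * 2 + b)]
    ring

theorem pvVal_append (l₁ l₂ : List Int) :
    pvVal 0 (l₁ ++ l₂) = pvVal 0 l₁ * 2 ^ l₂.length + pvVal 0 l₂ := by
  have : pvVal 0 (l₁ ++ l₂) = pvVal (pvVal 0 l₁) l₂ := by
    simp [pvVal, List.foldl_append]
  rw [this, pvVal_acc]

def pvIsBits (l : List Int) : Prop := ∀ b ∈ l, b = 0 ∨ b = 1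

theorem pvBits_isBits (hv : List Int) : pvIsBits (pvBits hv) := by
  intro b hb
  simp only [pvBits, List.mem_map] at hb
  obtain ⟨x, _, rfl⟩ := hb
  exact Int.emod_two_eq x

theorem pvVal_bounds (l : List Int) (h : pvIsBits l) :
    0 ≤ pvVal 0 l ∧ pvVal 0 l < 2 ^ l.length := by
  induction l with
  | nil => simp [pvVal]
  | cons b l ih =>
    have hb := h b (List.mem_cons_self ..)
    have hl : pvIsBits l := fun x hx => h x (List.mem_cons_of_mem _ hx)
    obtain ⟨h0, h1⟩ := ih hl
    have : pvVal 0 (b :: l) = b * 2 ^ l.length + pvVal 0 l := by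
      simp only [pvVal, List.foldl_cons, zero_mul, zero_add]
      exact pvVal_acc l b
    rw [this]
    constructor
    · rcases hb with rfl | rfl <;> simp <;> omega
    · simp only [List.length_cons, pow_succ]
      rcases hb with rfl | rfl <;> nlinarith

theorem pvVal_replicate (k : Nat) : pvVal 0 (List.replicate k 0) = 0 := by
  induction k with
  | zero => simp [pvVal]
  | succ k ih => simpa [pvVal, List.replicate_succ] using ih

theorem bits_getD (hv : List Int) (i : Nat) :
    (pvBits hv).getD i 0 = (hv.getD i 0).emod 2 := by
  simp only [pvBits, List.getD, List.getElem?_map]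
  cases hv[i]? with
  | none => simp; decide
  | some x => simp

theorem pvFoldIdx (l : List Int) (c : Nat) (t : Int) (h : c ≤ l.length) :
    (List.range c).foldl (fun a j => a * 2 + l.getD j 0) t = pvVal t (l.take c) := by
  induction c with
  | zero => simp [pvVal]
  | succ c ih =>
    have hc : c < l.length := by omega
    rw [List.range_succ, List.foldl_append, ih (by omega)]
    have ht : l.take (c + 1) = l.take c ++ [l[c]] := by
      rw [List.take_add_one]
      simp [List.getElem?_eq_getElem hc]
    rw [ht]
    unfold pvVal
    rw [List.foldl_append]
    simp [List.getD, List.getElem?_eq_getElem hc]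

theorem pvFoldIdxOff (l : List Int) (k c : Nat) (h : k + c ≤ l.length) :
    (List.range c).foldl (fun a j => a * 2 + l.getD (k + j) 0) 0
      = pvVal 0 ((l.drop k).take c) := by
  have he : (fun (a : Int) (j : Nat) => a * 2 + l.getD (k + j) 0)
      = fun a j => a * 2 + (l.drop k).getD j 0 := by
    funext a j
    simp [List.getD, List.getElem?_drop]
  rw [he, pvFoldIdx (l.drop k) c 0 (by simp; omega)]

theorem pvExtract (p c s : List Int) (hc : pvIsBits c) (hs : pvIsBits s) :
    (pvVal 0 (p ++ (c ++ s)) / 2 ^ s.length).emod (2 ^ c.length) = pvVal 0 c := by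
  obtain ⟨hc0, hc1⟩ := pvVal_bounds c hc
  obtain ⟨hs0, hs1⟩ := pvVal_bounds s hs
  rw [pvVal_append p (c ++ s), pvVal_append c s]
  have hdiv : (pvVal 0 p * 2 ^ (c ++ s).length + (pvVal 0 c * 2 ^ s.length + pvVal 0 s))
      / 2 ^ s.length = pvVal 0 p * 2 ^ c.length + pvVal 0 c := by
    have : pvVal 0 p * 2 ^ (c ++ s).length + (pvVal 0 c * 2 ^ s.length + pvVal 0 s)
        = pvVal 0 s + (pvVal 0 p * 2 ^ c.length + pvVal 0 c) * 2 ^ s.length := by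
      simp [List.length_append, pow_add]; ring
    rw [this, Int.add_mul_ediv_right _ _ (by positivity),
      Int.ediv_eq_zero_of_lt hs0 hs1, zero_add]
  rw [hdiv, add_comm, mul_comm (pvVal 0 p)]
  show (pvVal 0 c + 2 ^ c.length * pvVal 0 p) % 2 ^ c.length = pvVal 0 c
  rw [Int.add_mul_emod_self_left, Int.emod_eq_of_lt hc0 hc1]

theorem pvWord_eq (l : List Int) (hb : pvIsBits l) (i : Nat) (h : 32 * (i + 1) ≤ l.length) :
    (pvVal 0 l / 2 ^ (l.length - 32 * (i + 1))).emod (2 ^ 32)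
      = pvVal 0 ((l.drop (32 * i)).take 32) := by
  have e1 : l = l.take (32 * i) ++ ((l.drop (32 * i)).take 32 ++ (l.drop (32 * i)).drop 32) := by
    rw [List.take_append_drop, List.take_append_drop]
  have hclen : ((l.drop (32 * i)).take 32).length = 32 := by simp; omega
  have hslen : ((l.drop (32 * i)).drop 32).length = l.length - 32 * (i + 1) := by simp; omega
  have hcb : pvIsBits ((l.drop (32 * i)).take 32) :=
    fun x hx => hb x (List.mem_of_mem_drop (List.mem_of_mem_take hx))
  have hsb : pvIsBits ((l.drop (32 * i)).drop 32) :=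
    fun x hx => hb x (List.mem_of_mem_drop (List.mem_of_mem_drop hx))
  have he := pvExtract (l.take (32 * i)) ((l.drop (32 * i)).take 32) ((l.drop (32 * i)).drop 32) hcb hsb
  rw [hclen, hslen, ← e1] at he
  exact he

theorem pvPadded_isBits (hv : List Int) (k : Nat) :
    pvIsBits (pvBits hv ++ List.replicate k 0) := by
  intro b hb
  rcases List.mem_append.1 hb with h | h
  · exact pvBits_isBits hv b h
  · left; exact List.eq_of_mem_replicate h

theorem pvTotal_eq (hv : List Int) (k : Nat) :
    pvVal 0 (pvBits hv) * 2 ^ k = pvVal 0 (pvBits hv ++ List.replicate k 0) := by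
  rw [pvVal_append]
  simp [pvVal_replicate]

theorem pvMaskFun_eq (hv : List Int) (k : Nat) :
    (fun (num : Int) (j : Nat) => num * 2 + (hv.getD (k + j) 0).emod 2)
      = fun num j => num * 2 + (pvBits hv).getD (k + j) 0 := by
  funext a j
  rw [bits_getD]

theorem pvWordA_eq (hv : List Int) (i : Nat) (h : i * 32 + 32 ≤ hv.length) (k : Nat) :
    (List.range 32).foldl (fun num j => num * 2 + (hv.getD (i * 32 + j) 0).emod 2) 0
      = pvVal 0 (((pvBits hv ++ List.replicate k 0).drop (32 * i)).take 32) := by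
  rw [pvMaskFun_eq hv (i * 32),
    pvFoldIdxOff (pvBits hv) (i * 32) 32 (by simp [pvBits]; omega)]
  have hdrop : (pvBits hv ++ List.replicate k 0).drop (32 * i)
      = (pvBits hv).drop (32 * i) ++ List.replicate k 0 :=
    List.drop_append_of_le_length (by simp [pvBits]; omega)
  have htake : ((pvBits hv).drop (32 * i) ++ List.replicate k 0).take 32
      = ((pvBits hv).drop (32 * i)).take 32 :=
    List.take_append_of_le_length (by simp [pvBits]; omega)
  rw [hdrop, htake, Nat.mul_comm 32 i]

theorem pvTailA_eq (hv : List Int) (hk : hv.length % 32 > 0) :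
    ((List.range (hv.length % 32)).foldl
        (fun num j => num * 2 + (hv.getD (hv.length / 32 * 32 + j) 0).emod 2) 0)
        * 2 ^ (32 - hv.length % 32)
      = pvVal 0 (((pvBits hv ++ List.replicate (((hv.length + 31) / 32) * 32 - hv.length) 0).drop
          (32 * (hv.length / 32))).take 32) := by
  have hlen : (pvBits hv).length = hv.length := by simp [pvBits]
  rw [pvMaskFun_eq hv (hv.length / 32 * 32),
    pvFoldIdxOff (pvBits hv) (hv.length / 32 * 32) (hv.length % 32) (by rw [hlen]; omega)]
  have hdl : ((pvBits hv).drop (hv.length / 32 * 32)).length = hv.length % 32 := by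
    simp [hlen]; omega
  rw [List.take_of_length_le (by omega)]
  have hdrop : (pvBits hv ++ List.replicate (((hv.length + 31) / 32) * 32 - hv.length) 0).drop
        (32 * (hv.length / 32))
      = (pvBits hv).drop (hv.length / 32 * 32)
          ++ List.replicate (((hv.length + 31) / 32) * 32 - hv.length) 0 := by
    rw [Nat.mul_comm 32]
    exact List.drop_append_of_le_length (by rw [hlen]; omega)
  have htake : ((pvBits hv).drop (hv.length / 32 * 32)
        ++ List.replicate (((hv.length + 31) / 32) * 32 - hv.length) 0).take 32
      = (pvBits hv).drop (hv.length / 32 * 32)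
          ++ List.replicate (((hv.length + 31) / 32) * 32 - hv.length) 0 := by
    apply List.take_of_length_le
    simp [hdl]; omega
  rw [hdrop, htake, pvVal_append]
  have : (List.replicate (((hv.length + 31) / 32) * 32 - hv.length) 0 : List Int).length
      = 32 - hv.length % 32 := by simp; omega
  rw [this, pvVal_replicate, add_zero]

def pvChunk (hv : List Int) (i : Nat) : Int :=
  pvVal 0 (((pvBits hv ++ List.replicate ((hv.length + 31) / 32 * 32 - hv.length) 0).drop
    (32 * i)).take 32)

theorem pvB_list (hv : List Int) :
    (List.range ((hv.length + 31) / 32 * 32 / 32)).map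
        (fun i => pvHex8
          ((hv.foldl (fun (t b : Int) => t * 2 + b.emod 2) 0 * 2 ^ ((hv.length + 31) / 32 * 32 - hv.length) /
            2 ^ ((hv.length + 31) / 32 * 32 - 32 * (i + 1))).emod (2 ^ 32)))
      = ((List.range ((hv.length + 31) / 32 * 32 / 32)).map (pvChunk hv)).map pvHex8 := by
  rw [List.map_map]
  apply List.map_congr_left
  intro i hi
  simp only [List.mem_range, Function.comp_apply] at *
  congr 1
  have hfold : hv.foldl (fun (t b : Int) => t * 2 + b.emod 2) 0 = pvVal 0 (pvBits hv) := by
    simp [pvVal, pvBits, List.foldl_map]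
  rw [hfold, pvTotal_eq hv ((hv.length + 31) / 32 * 32 - hv.length)]
  have hlen : (pvBits hv ++ List.replicate ((hv.length + 31) / 32 * 32 - hv.length) 0).length
      = (hv.length + 31) / 32 * 32 := by simp [pvBits]; omega
  have hw := pvWord_eq _ (pvPadded_isBits hv ((hv.length + 31) / 32 * 32 - hv.length)) i
    (by rw [hlen]; omega)
  rw [hlen] at hw
  exact hw

theorem pvA_list (hv : List Int) :
    (if hv.length % 32 > 0 then
        (List.range (hv.length / 32)).map
            (fun i => (List.range 32).foldl (fun num j => num * 2 + (hv.getD (i * 32 + j) 0).emod 2) 0)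
          ++ [(List.range (hv.length % 32)).foldl
                (fun num j => num * 2 + (hv.getD (hv.length / 32 * 32 + j) 0).emod 2) 0
              * 2 ^ (32 - hv.length % 32)]
      else
        (List.range (hv.length / 32)).map
          (fun i => (List.range 32).foldl (fun num j => num * 2 + (hv.getD (i * 32 + j) 0).emod 2) 0))
      = (List.range ((hv.length + 31) / 32 * 32 / 32)).map (pvChunk hv) := by
  split_ifs with h
  · have hm : (hv.length + 31) / 32 * 32 / 32 = hv.length / 32 + 1 := by omega
    rw [hm]
    conv_rhs => rw [List.range_succ]
    rw [List.map_append]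
    congr 1
    · apply List.map_congr_left
      intro i hi
      simp only [List.mem_range] at hi
      exact pvWordA_eq hv i (by omega) _
    · simp only [List.map_cons, List.map_nil, List.cons.injEq, and_true]
      exact pvTailA_eq hv h
  · have hm : (hv.length + 31) / 32 * 32 / 32 = hv.length / 32 := by omega
    rw [hm]
    apply List.map_congr_left
    intro i hi
    simp only [List.mem_range] at hi
    exact pvWordA_eq hv i (by omega) _

theorem pvMain (hv : List Int) : c_gen_hv_to_hex_arr hv = c_gen_hv_to_hex_arr_alt hv := by
  unfold c_gen_hv_to_hex_arr c_gen_hv_to_hex_arr_alt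
  dsimp only
  rw [pvB_list, pvA_list]

-- ===== VERDICT (by name: the statement is the Claim_ definition above) =====
theorem c_gen_hv_to_hex_arr_spec : Claim_equal_c_gen_hv_to_hex_arr := by
  intro hv _
  unfold Spec_c_gen_hv_to_hex_arr
  exact pvMain hv
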